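-- pv_equiv track=rewrite | github.com/rstyczynski/oci_bv4db_arch | tools/analysis/correlation/full_correlation.py | _group_variables
-- ===== SOURCE A (Python) =====
-- from typing import Dict, List, Any, Tuple, Optional
--
-- def _group_variables(columns: List[str]) -> Dict[str, List[str]]:
--     """Group variables by type."""
--     groups = {
--         'guest_iostat': [],
--         'oci_blockvolume': [],
--         'oci_compute': [],
--         'oci_network': [],
--         'workload': [],
--         'other': []
--     }
--
--     for col in columns:
--         cl = col.lower()
--         if 'iostat' in cl or cl in ['read_kbps', 'write_kbps', 'reads_per_sec', 'writes_per_sec']: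
--             groups['guest_iostat'].append(col)
--         elif 'volume' in cl or any(x in cl for x in ['data1', 'data2', 'redo', 'fra', 'boot']):
--             groups['oci_blockvolume'].append(col)
--         elif 'compute' in cl or 'cpu' in cl or 'memory' in cl:
--             groups['oci_compute'].append(col)
--         elif 'vnic' in cl or 'network' in cl:
--             groups['oci_network'].append(col)
--         elif 'tps' in cl or 'fio' in cl or 'swingbench' in cl:
--             groups['workload'].append(col)
--         else:
--             groups['other'].append(col)
--
--     return {k: v for k, v in groups.items() if v}
-- ===== SOURCE B (Python) =====
-- def _group_variables(columns):
--     """Group variables by type."""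
--     def _classify(col):
--         cl = col.lower()
--         if 'iostat' in cl or cl in ('read_kbps', 'write_kbps', 'reads_per_sec', 'writes_per_sec'):
--             return 'guest_iostat'
--         if 'volume' in cl or any(x in cl for x in ('data1', 'data2', 'redo', 'fra', 'boot')):
--             return 'oci_blockvolume'
--         if 'compute' in cl or 'cpu' in cl or 'memory' in cl:
--             return 'oci_compute'
--         if 'vnic' in cl or 'network' in cl:
--             return 'oci_network'
--         if 'tps' in cl or 'fio' in cl or 'swingbench' in cl:
--             return 'workload'
--         return 'other'
--
--     labels = [_classify(c) for c in columns]
--     result = {}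
--     for name in ('guest_iostat', 'oci_blockvolume', 'oci_compute',
--                  'oci_network', 'workload', 'other'):
--         members = [c for c, l in zip(columns, labels) if l == name]
--         if members:
--             result[name] = members
--     return result
-- ===== Notes on version B (the rewrite author's own statement) =====
-- stated objective: alternative
-- what changed: B replaces A's single pass that appends into six pre-initialized dict buckets by a classify-then-gather decomposition: it labels every column once, then builds each group in fixed order as a filter of the column list, keeping only non-empty groups.
import Mathlib
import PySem

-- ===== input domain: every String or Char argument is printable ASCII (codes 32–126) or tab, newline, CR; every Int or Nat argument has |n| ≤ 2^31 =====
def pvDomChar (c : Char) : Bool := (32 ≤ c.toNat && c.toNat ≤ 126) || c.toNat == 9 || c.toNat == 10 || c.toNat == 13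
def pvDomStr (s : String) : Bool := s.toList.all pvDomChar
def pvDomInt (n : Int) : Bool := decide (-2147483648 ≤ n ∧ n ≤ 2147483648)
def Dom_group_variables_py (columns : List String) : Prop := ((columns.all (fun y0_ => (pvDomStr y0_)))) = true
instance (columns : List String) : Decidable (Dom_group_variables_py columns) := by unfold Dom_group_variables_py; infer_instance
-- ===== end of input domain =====

-- B groups the columns by a classify-then-gather decomposition (label every column, then build
-- each group in fixed order as a filter) instead of A's single pass appending into six dict
-- buckets; same cost, different structure (objective: alternative).

-- ===== PORT A =====
-- the five branch conditions of A's if/elif chain, on cl = col.lower()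
def pvCondIostat (cl : String) : Bool :=
  PySem.Str.isIn "iostat" cl ||
    (["read_kbps", "write_kbps", "reads_per_sec", "writes_per_sec"].contains cl)
def pvCondVolume (cl : String) : Bool :=
  PySem.Str.isIn "volume" cl ||
    (["data1", "data2", "redo", "fra", "boot"].any (fun x => PySem.Str.isIn x cl))
def pvCondCompute (cl : String) : Bool :=
  PySem.Str.isIn "compute" cl || PySem.Str.isIn "cpu" cl || PySem.Str.isIn "memory" cl
def pvCondNetwork (cl : String) : Bool :=
  PySem.Str.isIn "vnic" cl || PySem.Str.isIn "network" cl
def pvCondWorkload (cl : String) : Bool :=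
  PySem.Str.isIn "tps" cl || PySem.Str.isIn "fio" cl || PySem.Str.isIn "swingbench" cl

-- the body of A's for-loop: append col to the bucket of the first matching branch
def pvStepA (g : List String × List String × List String × List String × List String × List String)
    (col : String) :
    List String × List String × List String × List String × List String × List String :=
  match g with
  | (a, b, c, d, e, f) =>
    let cl := PySem.Str.lower col
    if pvCondIostat cl then (a ++ [col], b, c, d, e, f)
    else if pvCondVolume cl then (a, b ++ [col], c, d, e, f)
    else if pvCondCompute cl then (a, b, c ++ [col], d, e, f)
    else if pvCondNetwork cl then (a, b, c, d ++ [col], e, f)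
    else if pvCondWorkload cl then (a, b, c, d, e ++ [col], f)
    else (a, b, c, d, e, f ++ [col])

def group_variables_py (columns : List String) : List (String × List String) :=
  match columns.foldl pvStepA ([], [], [], [], [], []) with
  | (a, b, c, d, e, f) =>
    ([("guest_iostat", a), ("oci_blockvolume", b), ("oci_compute", c),
      ("oci_network", d), ("workload", e), ("other", f)]).filter (fun p => !p.2.isEmpty)

-- ===== PORT B =====
-- Source B's _classify: first matching rule's group name
def pvClassify (col : String) : String :=
  let cl := PySem.Str.lower col
  if pvCondIostat cl then "guest_iostat"
  else if pvCondVolume cl then "oci_blockvolume"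
  else if pvCondCompute cl then "oci_compute"
  else if pvCondNetwork cl then "oci_network"
  else if pvCondWorkload cl then "workload"
  else "other"

def group_variables_py_alt (columns : List String) : List (String × List String) :=
  let labels := columns.map pvClassify
  (["guest_iostat", "oci_blockvolume", "oci_compute", "oci_network", "workload", "other"]).foldl
    (fun res name =>
      let members := ((columns.zip labels).filter (fun p => p.2 == name)).map (fun p => p.1)
      if members.isEmpty then res else res ++ [(name, members)]) []

-- ===== PRECONDITION & SPEC =====
def Spec_group_variables_py (columns : List String) (out : List (String × List String)) : Prop := out = group_variables_py_alt columns
instance (columns : List String) (out : List (String × List String)) : Decidable (Spec_group_variables_py columns out) := by unfold Spec_group_variables_py; infer_instance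

-- ===== CLAIM (what is proved, stated in full; the proofs are below) =====
def Claim_equal_group_variables_py : Prop := ∀ (columns : List String), Dom_group_variables_py columns → Spec_group_variables_py columns (group_variables_py columns)

-- ===== LEMMAS AND PROOFS =====

-- B's gather of one group equals a direct filter by the classify label
theorem pv_zip_filter (columns : List String) (name : String) :
    ((columns.zip (columns.map pvClassify)).filter (fun p => p.2 == name)).map (fun p => p.1)
      = columns.filter (fun c => pvClassify c == name) := by
  induction columns with
  | nil => rfl
  | cons x xs ih =>
    simp only [List.map_cons, List.zip_cons_cons, List.filter_cons]
    by_cases h : pvClassify x == name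
    · simp [h, ih]
    · simp only [h]
      simpa using ih

-- invariant of A's loop: the six buckets are the six classify-filters, appended
theorem pv_foldA (columns : List String) (a b c d e f : List String) :
    columns.foldl pvStepA (a, b, c, d, e, f)
      = (a ++ columns.filter (fun x => pvClassify x == "guest_iostat"),
         b ++ columns.filter (fun x => pvClassify x == "oci_blockvolume"),
         c ++ columns.filter (fun x => pvClassify x == "oci_compute"),
         d ++ columns.filter (fun x => pvClassify x == "oci_network"),
         e ++ columns.filter (fun x => pvClassify x == "workload"),
         f ++ columns.filter (fun x => pvClassify x == "other")) := by
  induction columns generalizing a b c d e f with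
  | nil => simp
  | cons x xs ih =>
    simp only [List.foldl_cons, pvStepA]
    by_cases h1 : pvCondIostat (PySem.Str.lower x)
    · have hc : pvClassify x = "guest_iostat" := by simp [pvClassify, h1]
      simp only [if_pos h1, ih, List.filter_cons, hc]
      simp [List.append_assoc]
    by_cases h2 : pvCondVolume (PySem.Str.lower x)
    · have hc : pvClassify x = "oci_blockvolume" := by simp [pvClassify, h1, h2]
      simp only [if_neg h1, if_pos h2, ih, List.filter_cons, hc]
      simp [List.append_assoc]
    by_cases h3 : pvCondCompute (PySem.Str.lower x)
    · have hc : pvClassify x = "oci_compute" := by simp [pvClassify, h1, h2, h3]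
      simp only [if_neg h1, if_neg h2, if_pos h3, ih, List.filter_cons, hc]
      simp [List.append_assoc]
    by_cases h4 : pvCondNetwork (PySem.Str.lower x)
    · have hc : pvClassify x = "oci_network" := by simp [pvClassify, h1, h2, h3, h4]
      simp only [if_neg h1, if_neg h2, if_neg h3, if_pos h4, ih, List.filter_cons, hc]
      simp [List.append_assoc]
    by_cases h5 : pvCondWorkload (PySem.Str.lower x)
    · have hc : pvClassify x = "workload" := by simp [pvClassify, h1, h2, h3, h4, h5]
      simp only [if_neg h1, if_neg h2, if_neg h3, if_neg h4, if_pos h5, ih, List.filter_cons, hc]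
      simp [List.append_assoc]
    · have hc : pvClassify x = "other" := by simp [pvClassify, h1, h2, h3, h4, h5]
      simp only [if_neg h1, if_neg h2, if_neg h3, if_neg h4, if_neg h5, ih, List.filter_cons, hc]
      simp [List.append_assoc]

-- B's result loop appends each non-empty (name, group) pair: it is a filter of the pair list
theorem pv_build (names : List String) (F : String → List String)
    (acc : List (String × List String)) :
    names.foldl (fun res name =>
        let members := F name
        if members.isEmpty then res else res ++ [(name, members)]) acc
      = acc ++ (names.map (fun n => (n, F n))).filter (fun p => !p.2.isEmpty) := by
  induction names generalizing acc with
  | nil => simp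
  | cons n ns ih =>
    simp only [List.foldl_cons, List.map_cons, List.filter_cons]
    by_cases h : (F n).isEmpty
    · simpa [h] using ih acc
    · simpa [h, List.append_assoc] using ih (acc ++ [(n, F n)])

-- ===== VERDICT (by name: the statement is the Claim_ definition above) =====
theorem group_variables_py_spec : Claim_equal_group_variables_py := by
  intro columns _
  show group_variables_py columns = group_variables_py_alt columns
  rw [group_variables_py, group_variables_py_alt, pv_foldA]
  simp only [pv_zip_filter]
  rw [pv_build]
  simp only [List.map_cons, List.map_nil, List.nil_append]
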